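-- pv_equiv track=rewrite | github.com/radualex/2IMM15 | Crawler/query_processing.py | process_matrices
-- ===== SOURCE A (Python) =====
-- def calculate_binary_value_from_not_operator(matrix):
--     arr = [0] * len(matrix)
--     i = 0
--     while(i < len(matrix)):
--         if(matrix[i] == 1):
--             arr[i] = 0
--         else:
--             arr[i] = 1
--         i += 1
--     return arr
--
-- def calculate_binary_value_from_and_operator(matrix1, matrix2):
--     arr = [0] * len(matrix1)
--     i = 0
--     while(i < len(arr)):
--         if(matrix1[i] == 1 and matrix2[i] == 1):
--             arr[i] = 1
--         else:
--             arr[i] = 0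
--         i += 1
--     return arr
--
-- def calculate_binary_value_from__or_operator(matrix1, matrix2):
--     arr = [0] * len(matrix1)
--     i = 0
--     while(i < len(arr)):
--         if(matrix1[i] == 0 and matrix2[i] == 0):
--             arr[i] = 0
--         else:
--             arr[i] = 1
--         i += 1
--     return arr
--
-- def calculate_binary_value_and_or(matrix1, matrix2, operator):
--     if(operator == 'and'):
--         return calculate_binary_value_from_and_operator(matrix1, matrix2)
--     else:
--         return calculate_binary_value_from__or_operator(matrix1, matrix2)
--
-- def process_final_matrix(inc_matrices, operators):
--     if(len(inc_matrices) == 1):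
--         return inc_matrices[0]
--     else:
--         result = calculate_binary_value_and_or(
--             inc_matrices[0], inc_matrices[1], operators[0])
--         new_matrices = []
--         new_matrices.append(result)
--         if(len(inc_matrices[2:]) != 0):
--             for arr in inc_matrices[2:]:
--                 new_matrices.append(arr)
--         new_operators = []
--         for arr in operators[1:]:
--             new_operators.append(arr)
--         return process_final_matrix(new_matrices, new_operators)
--
-- def process_matrices(inc_matrices, operators):
--     # process 'not' operator first
--     if(len(inc_matrices) == 1 and len(operators) == 1 and operators[0] == 'not'):
--         return calculate_binary_value_from_not_operator(inc_matrices[0])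
--     else:
--         i = 1
--         while(i < len(inc_matrices)):
--             if(operators[i - 1] == 'not'):
--                 new_matrix = calculate_binary_value_from_not_operator(
--                     inc_matrices[i])
--                 inc_matrices[i] = new_matrix
--                 operators[i - 1] = 'and'
--             i += 1
--
--         final_matrix = process_final_matrix(inc_matrices, operators)
--         return final_matrix
-- ===== SOURCE B (Python) =====
-- def process_matrices(inc_matrices, operators):
--     if len(inc_matrices) == 1 and operators == ['not']:
--         return [0 if x == 1 else 1 for x in inc_matrices[0]]
--     acc = list(inc_matrices[0])
--     for row, op in zip(inc_matrices[1:], operators):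
--         if op == 'not':
--             row = [0 if x == 1 else 1 for x in row]
--             op = 'and'
--         if op == 'and':
--             acc = [1 if a == 1 and b == 1 else 0 for a, b in zip(acc, row)]
--         else:
--             acc = [0 if a == 0 and b == 0 else 1 for a, b in zip(acc, row)]
--     return acc
-- ===== Notes on version B (the rewrite author's own statement) =====
-- stated objective: faster
-- what changed: Replaces the mutating 'not' pre-pass plus the recursive process_final_matrix (which copies the remaining matrix and operator lists on every reduction step, quadratic in the number of matrices) by one left fold over zip(inc_matrices[1:], operators) with an element-wise comprehension per step, handling 'not' inline; B does not mutate its arguments (return value equivalence only).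
-- outside the precondition, e.g. on process_matrices([[0, 3], [0]], ['or']): A returns [0, 1], B returns [0]
import Mathlib
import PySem

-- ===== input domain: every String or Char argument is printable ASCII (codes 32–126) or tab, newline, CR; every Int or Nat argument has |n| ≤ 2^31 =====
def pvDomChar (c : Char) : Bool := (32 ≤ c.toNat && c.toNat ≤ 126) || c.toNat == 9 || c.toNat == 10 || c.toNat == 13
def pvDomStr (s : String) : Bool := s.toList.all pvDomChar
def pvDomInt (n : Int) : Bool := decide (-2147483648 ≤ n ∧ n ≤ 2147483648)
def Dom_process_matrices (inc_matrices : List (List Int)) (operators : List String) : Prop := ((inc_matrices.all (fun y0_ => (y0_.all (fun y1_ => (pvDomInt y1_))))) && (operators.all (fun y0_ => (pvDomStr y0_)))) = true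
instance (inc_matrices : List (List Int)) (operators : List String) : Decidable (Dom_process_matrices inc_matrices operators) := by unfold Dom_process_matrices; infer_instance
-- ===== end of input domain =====

-- B is the return-value equivalent of A written as one left fold; A mutates its arguments in
-- place during the 'not' pre-pass, B does not — the claim is about the RETURN value only.

-- ===== PORT A =====
-- A's index loops write arr[i] from matrix[i] for each i < len; ported as a map over the index range.
def calcNotA (matrix : List Int) : List Int :=
  (List.range matrix.length).map (fun i => if matrix.getD i 0 == 1 then (0 : Int) else 1)

def calcAndA (m1 m2 : List Int) : List Int :=
  (List.range m1.length).map (fun i => if m1.getD i 0 == 1 && m2.getD i 0 == 1 then (1 : Int) else 0)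

def calcOrA (m1 m2 : List Int) : List Int :=
  (List.range m1.length).map (fun i => if m1.getD i 0 == 0 && m2.getD i 0 == 0 then (0 : Int) else 1)

def calcAndOrA (m1 m2 : List Int) (op : String) : List Int :=
  if op == "and" then calcAndA m1 m2 else calcOrA m1 m2

-- recursive reduction of process_final_matrix; the [] case is unreachable inside Pre_ (Python raises there)
def processFinalA (ms : List (List Int)) (ops : List String) : List Int :=
  match ms, ops with
  | [m], _ => m
  | m1 :: m2 :: rest, ops => processFinalA (calcAndOrA m1 m2 (ops.headD "") :: rest) ops.tail
  | [], _ => []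
termination_by ms.length
decreasing_by simp

-- the while-loop 'not' pre-pass over i = 1.. : rewrites inc_matrices[i] and operators[i-1]
def notPassA : List (List Int) → List String → (List (List Int) × List String)
  | [], ops => ([], ops)
  | m :: ms, [] => (m :: ms, [])   -- Python raises here (operators[i-1]); outside Pre_
  | m :: ms, op :: ops =>
      ((if op == "not" then calcNotA m else m) :: (notPassA ms ops).1,
       (if op == "not" then "and" else op) :: (notPassA ms ops).2)

def process_matrices (inc_matrices : List (List Int)) (operators : List String) : List Int :=
  if inc_matrices.length == 1 && operators.length == 1 && operators.getD 0 "" == "not" then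
    calcNotA (inc_matrices.headD [])
  else
    match inc_matrices with
    | [] => processFinalA [] operators     -- loop body never runs; Python then raises in process_final_matrix
    | m0 :: rest =>
        let r := notPassA rest operators
        processFinalA (m0 :: r.1) r.2

-- ===== PORT B =====
def negRowB (row : List Int) : List Int := row.map (fun x => if x == 1 then (0 : Int) else 1)

-- Source B rebinds (row, op) to (negated row, 'and') when op is 'not' and then tests op; ported as
-- the equivalent nested conditional on the same pair.
def stepB (acc : List Int) (p : List Int × String) : List Int :=
  if p.2 == "not" then
    List.zipWith (fun a b => if a == 1 && b == 1 then (1 : Int) else 0) acc (negRowB p.1)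
  else if p.2 == "and" then
    List.zipWith (fun a b => if a == 1 && b == 1 then (1 : Int) else 0) acc p.1
  else
    List.zipWith (fun a b => if a == 0 && b == 0 then (0 : Int) else 1) acc p.1

def process_matrices_alt (inc_matrices : List (List Int)) (operators : List String) : List Int :=
  if inc_matrices.length == 1 && operators == ["not"] then
    negRowB (inc_matrices.headD [])
  else
    match inc_matrices with
    | [] => []                             -- Python B raises here (inc_matrices[0]); outside Pre_
    | m0 :: rest => ((rest.zip operators).foldl stepB m0)

-- ===== PRECONDITION & SPEC =====
-- Pre_ excludes empty matrix lists and too-short operator lists (A raises IndexError there) and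
-- ragged inputs where a later row is shorter than the first: on those A either raises IndexError
-- or returns a value that exists only because boolean short-circuiting skipped the missing
-- element, an accident of A's element test; B truncates to the shorter row there (zip).
def Pre_process_matrices (inc_matrices : List (List Int)) (operators : List String) : Prop :=
  inc_matrices ≠ [] ∧ inc_matrices.length - 1 ≤ operators.length ∧
    ∀ row ∈ inc_matrices.tail, (inc_matrices.headD []).length ≤ row.length

instance (inc_matrices : List (List Int)) (operators : List String) : Decidable (Pre_process_matrices inc_matrices operators) := by unfold Pre_process_matrices; infer_instance

def pvWitness_process_matrices : List (List Int) × List String := ([[1, 0], [0, 1]], ["or"])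

def Spec_process_matrices (inc_matrices : List (List Int)) (operators : List String) (out : List Int) : Prop := out = process_matrices_alt inc_matrices operators
instance (inc_matrices : List (List Int)) (operators : List String) (out : List Int) : Decidable (Spec_process_matrices inc_matrices operators out) := by unfold Spec_process_matrices; infer_instance

-- ===== CLAIM (what is proved, stated in full; the proofs are below) =====
def Claim_equal_process_matrices : Prop := ∀ (inc_matrices : List (List Int)) (operators : List String), Dom_process_matrices inc_matrices operators → Pre_process_matrices inc_matrices operators → Spec_process_matrices inc_matrices operators (process_matrices inc_matrices operators)

-- ===== LEMMAS AND PROOFS =====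

theorem calcNotA_eq_negRowB (m : List Int) : calcNotA m = negRowB m := by
  apply List.ext_getElem
  · simp [calcNotA, negRowB]
  · intro i h1 h2
    have hi : i < m.length := by simpa [calcNotA] using h1
    simp [calcNotA, negRowB, List.getD_eq_getElem?_getD, List.getElem?_eq_getElem hi]

theorem calcAndA_eq_zipWith (m1 m2 : List Int) (h : m1.length ≤ m2.length) :
    calcAndA m1 m2 = List.zipWith (fun a b => if a == 1 && b == 1 then (1 : Int) else 0) m1 m2 := by
  apply List.ext_getElem
  · simp [calcAndA]; omega
  · intro i h1 h2
    have hi1 : i < m1.length := by simp [calcAndA] at h1; omega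
    have hi2 : i < m2.length := by omega
    simp [calcAndA, List.getD_eq_getElem?_getD, hi1, hi2]

theorem calcOrA_eq_zipWith (m1 m2 : List Int) (h : m1.length ≤ m2.length) :
    calcOrA m1 m2 = List.zipWith (fun a b => if a == 0 && b == 0 then (0 : Int) else 1) m1 m2 := by
  apply List.ext_getElem
  · simp [calcOrA]; omega
  · intro i h1 h2
    have hi1 : i < m1.length := by simp [calcOrA] at h1; omega
    have hi2 : i < m2.length := by omega
    simp [calcOrA, List.getD_eq_getElem?_getD, hi1, hi2]

theorem negRowB_length (m : List Int) : (negRowB m).length = m.length := by simp [negRowB]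

theorem stepB_length (acc row : List Int) (op : String) (h : acc.length ≤ row.length) :
    (stepB acc (row, op)).length = acc.length := by
  unfold stepB
  by_cases hn : op == "not"
  · simp [hn, negRowB_length]; omega
  · by_cases ha : op == "and" <;> simp [hn, ha] <;> omega

-- A's pre-pass + recursive reduction equals B's single fold, given enough operators and rows.
theorem main_lemma : ∀ (rest : List (List Int)) (ops : List String) (m0 : List Int),
    rest.length ≤ ops.length → (∀ row ∈ rest, m0.length ≤ row.length) →
    processFinalA (m0 :: (notPassA rest ops).1) (notPassA rest ops).2 =
      (rest.zip ops).foldl stepB m0 := by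
  intro rest
  induction rest with
  | nil => intro ops m0 _ _; simp [notPassA, processFinalA]
  | cons r rs ih =>
    intro ops m0 hlen hrows
    match ops with
    | [] => simp at hlen
    | op :: ops' =>
      have hr : m0.length ≤ r.length := hrows r (by simp)
      have hlen' : rs.length ≤ ops'.length := by simp at hlen; omega
      have hrows' : ∀ row ∈ rs, (stepB m0 (r, op)).length ≤ row.length := by
        intro row hm
        rw [stepB_length _ _ _ hr]
        exact hrows row (by simp [hm])
      by_cases hn : op == "not"
      · have hlr : m0.length ≤ (negRowB r).length := by rw [negRowB_length]; exact hr
        have hstep : calcAndOrA m0 (calcNotA r) "and" = stepB m0 (r, op) := by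
          simp [calcAndOrA, stepB, hn, calcNotA_eq_negRowB, calcAndA_eq_zipWith _ _ hlr]
        simp only [notPassA, hn, if_true, processFinalA, List.headD_cons, List.tail_cons,
          List.zip_cons_cons, List.foldl_cons]
        rw [hstep]
        exact ih ops' _ hlen' hrows'
      · have hstep : calcAndOrA m0 r op = stepB m0 (r, op) := by
          by_cases ha : op == "and" <;>
            simp [calcAndOrA, stepB, hn, ha, calcAndA_eq_zipWith _ _ hr, calcOrA_eq_zipWith _ _ hr]
        simp only [notPassA, hn, if_false, Bool.false_eq_true, processFinalA, List.headD_cons,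
          List.tail_cons, List.zip_cons_cons, List.foldl_cons]
        rw [hstep]
        exact ih ops' _ hlen' hrows'

-- ===== VERDICT (by name: the statement is the Claim_ definition above) =====
theorem process_matrices_spec : Claim_equal_process_matrices := by
  intro inc ops _ hpre
  obtain ⟨hne, hlen, hrows⟩ := hpre
  unfold Spec_process_matrices process_matrices process_matrices_alt
  match inc with
  | [] => exact absurd rfl hne
  | m0 :: rest =>
    have hcond : ((m0 :: rest).length == 1 && ops.length == 1 && ops.getD 0 "" == "not")
        = ((m0 :: rest).length == 1 && ops == ["not"]) := by
      match ops with
      | [] => simp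
      | o :: os =>
        match os with
        | [] => simp [List.getD]
        | o2 :: os' => simp
    rw [hcond]
    by_cases hc : ((m0 :: rest).length == 1 && ops == ["not"]) = true
    · simp only [hc, if_true, List.headD_cons, calcNotA_eq_negRowB]
    · simp only [hc]
      simp only [Bool.not_eq_true] at hc
      apply main_lemma
      · simpa using hlen
      · simpa using hrows
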